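-- pv_equiv track=rewrite | github.com/0rphon/Swept | Sweeper.py | ExploitEasy
-- ===== SOURCE A (Python) =====
-- def ExploitEasy(result,cords):
--     times=0
--     p=True
--     board=[]
--     #format board data
--     for x in result:
--         if times==10 and p==True:
--             p=False
--             times=0
--         elif times==22 and p==False:
--             times=0
--             p=True
--         #structure useful board data
--         if p==True:
--             if MapBoard(x)!="?":
--                 board.append(MapBoard(x))
--         times+=1
--     #return processed board data
--     return board
--
-- def MapBoard(value):
--     if value==143:return"B"
--     elif value==15:return"X"
--     else: return "?"
-- ===== SOURCE B (Python) =====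
-- def MapBoard(value):
--     if value==143:return"B"
--     elif value==15:return"X"
--     else: return "?"
--
-- def ExploitEasy(result, cords):
--     # closed-form positional test: positions with index mod 32 < 10 are kept
--     return [MapBoard(x) for i, x in enumerate(result)
--             if i % 32 < 10 and MapBoard(x) != "?"]
-- ===== Notes on version B (the rewrite author's own statement) =====
-- stated objective: simpler
-- what changed: Replaces the mutable times/p counter-and-flag state machine with a stateless comprehension using the closed-form positional test i % 32 < 10 (period-32 pattern, 10 active positions).
import Mathlib
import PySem

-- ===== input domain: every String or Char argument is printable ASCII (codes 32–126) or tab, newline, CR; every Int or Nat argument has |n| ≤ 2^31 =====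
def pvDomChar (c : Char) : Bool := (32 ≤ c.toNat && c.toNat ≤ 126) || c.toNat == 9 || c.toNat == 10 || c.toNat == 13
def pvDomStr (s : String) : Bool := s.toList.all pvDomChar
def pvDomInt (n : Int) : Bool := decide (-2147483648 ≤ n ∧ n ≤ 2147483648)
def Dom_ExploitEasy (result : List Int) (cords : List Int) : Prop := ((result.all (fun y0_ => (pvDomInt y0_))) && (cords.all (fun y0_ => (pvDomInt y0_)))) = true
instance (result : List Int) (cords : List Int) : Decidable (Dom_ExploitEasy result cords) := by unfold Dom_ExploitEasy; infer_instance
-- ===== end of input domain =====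

-- B replaces A's mutable times/p counter-and-flag state machine by a stateless
-- comprehension with the closed-form positional test i % 32 < 10 (simpler, same cost).

-- ===== PORT A =====
def MapBoard (value : Int) : String :=
  if value = 143 then "B" else if value = 15 then "X" else "?"

-- A's loop state: (times, p, board); branches in the Python order
def ExploitEasyStep (st : Int × Bool × List String) (x : Int) : Int × Bool × List String :=
  let times := st.1
  let p := st.2.1
  let board := st.2.2
  let tp : Int × Bool :=
    if times = 10 ∧ p = true then (0, false)
    else if times = 22 ∧ p = false then (0, true)
    else (times, p)
  let board' :=
    if tp.2 = true then
      (if MapBoard x ≠ "?" then board ++ [MapBoard x] else board)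
    else board
  (tp.1 + 1, tp.2, board')

def ExploitEasy (result : List Int) (cords : List Int) : List String :=
  (result.foldl ExploitEasyStep (0, true, [])).2.2

-- ===== PORT B =====
def MapBoardB (value : Int) : String :=
  if value = 143 then "B" else if value = 15 then "X" else "?"

def ExploitEasy_alt (result : List Int) (cords : List Int) : List String :=
  (PySem.List.enumerate result 0).filterMap
    (fun p => if p.1 % 32 < 10 ∧ MapBoardB p.2 ≠ "?" then some (MapBoardB p.2) else none)

-- ===== PRECONDITION & SPEC =====
def Spec_ExploitEasy (result : List Int) (cords : List Int) (out : List String) : Prop := out = ExploitEasy_alt result cords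
instance (result : List Int) (cords : List Int) (out : List String) : Decidable (Spec_ExploitEasy result cords out) := by unfold Spec_ExploitEasy; infer_instance

-- ===== CLAIM (what is proved, stated in full; the proofs are below) =====
def Claim_equal_ExploitEasy : Prop := ∀ (result : List Int) (cords : List Int), Dom_ExploitEasy result cords → Spec_ExploitEasy result cords (ExploitEasy result cords)

-- ===== LEMMAS AND PROOFS =====

-- recursive characterisation with an explicit index offset
def altAux : List Int → Nat → List String
  | [], _ => []
  | x :: xs, i =>
    (if i % 32 < 10 ∧ MapBoard x ≠ "?" then [MapBoard x] else []) ++ altAux xs (i + 1)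

-- A's loop state entering iteration i
def preT (i : Nat) : Int :=
  if i = 0 then 0
  else if (i - 1) % 32 < 10 then (((i - 1) % 32 : Nat) : Int) + 1
  else (((i - 1) % 32 : Nat) : Int) - 9

def preP (i : Nat) : Bool :=
  if i = 0 then true else decide ((i - 1) % 32 < 10)

lemma transA (i : Nat) :
    (if preT i = 10 ∧ preP i = true then ((0:Int), false)
     else if preT i = 22 ∧ preP i = false then ((0:Int), true)
     else (preT i, preP i))
    = (if i % 32 < 10 then ((i % 32 : Nat) : Int) else ((i % 32 : Nat) : Int) - 10,
       decide (i % 32 < 10)) := by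
  by_cases h0 : i = 0
  · subst h0; norm_num [preT, preP]
  · simp only [preT, preP, if_neg h0]
    by_cases hl : (i - 1) % 32 < 10 <;> by_cases hm : i % 32 < 10 <;>
      simp only [hl, hm, decide_true, decide_false, if_true, if_false, and_true, and_false,
        if_pos, Prod.mk.injEq] <;>
      split_ifs <;> simp_all <;> omega

lemma step_pre (i : Nat) (acc : List String) (x : Int) :
    ExploitEasyStep (preT i, preP i, acc) x =
      (preT (i + 1), preP (i + 1),
        acc ++ (if i % 32 < 10 ∧ MapBoard x ≠ "?" then [MapBoard x] else [])) := by
  have hpre1 : preT (i + 1)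
      = if i % 32 < 10 then ((i % 32 : Nat) : Int) + 1 else ((i % 32 : Nat) : Int) - 9 := by
    simp only [preT, if_neg (by omega : ¬ i + 1 = 0), Nat.add_sub_cancel]
  have hpre2 : preP (i + 1) = decide (i % 32 < 10) := by
    simp only [preP, if_neg (by omega : ¬ i + 1 = 0), Nat.add_sub_cancel]
  simp only [ExploitEasyStep, transA, hpre1, hpre2]
  by_cases h : i % 32 < 10 <;> by_cases hm : MapBoard x = "?" <;> simp [h, hm] <;> omega

lemma loopA (l : List Int) : ∀ (i : Nat) (acc : List String),
    (l.foldl ExploitEasyStep (preT i, preP i, acc)).2.2 = acc ++ altAux l i := by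
  induction l with
  | nil => intro i acc; simp [altAux]
  | cons x xs ih =>
    intro i acc
    rw [List.foldl_cons, step_pre, ih (i + 1), altAux, List.append_assoc]

lemma altB (l : List Int) : ∀ (s : Nat),
    (PySem.List.enumerate l (s : Int)).filterMap
      (fun p => if p.1 % 32 < 10 ∧ MapBoardB p.2 ≠ "?" then some (MapBoardB p.2) else none)
      = altAux l s := by
  induction l with
  | nil => intro s; simp [PySem.List.enumerate_nil, altAux]
  | cons x xs ih =>
    intro s
    have hc : ((s : Int) % 32 < 10) ↔ (s % 32 < 10) := by
      constructor <;> intro h <;> omega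
    have hs1 : (s : Int) + 1 = ((s + 1 : Nat) : Int) := by push_cast; ring
    rw [PySem.List.enumerate_cons, List.filterMap_cons]
    simp only [hs1, ih (s + 1), altAux]
    by_cases h : s % 32 < 10 ∧ MapBoard x ≠ "?"
    · rw [if_pos, if_pos h] <;> simp_all [MapBoardB, MapBoard]
    · rw [if_neg, if_neg h] <;> simp_all [MapBoardB, MapBoard]

-- ===== VERDICT (by name: the statement is the Claim_ definition above) =====
theorem ExploitEasy_spec : Claim_equal_ExploitEasy := by
  intro result cords _
  unfold Spec_ExploitEasy ExploitEasy ExploitEasy_alt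
  have h0 : (0 : Int) = ((0 : Nat) : Int) := rfl
  rw [h0, altB result 0]
  have := loopA result 0 []
  simpa [preT, preP] using this
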